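-- pv_equiv track=rewrite | github.com/eegml/eeghdf | scripts/edf2eeghdf.py | find_blocks2
-- ===== SOURCE A (Python) =====
-- from builtins import range  # range and switch xrange -> range
--
-- def debug(*args):
--     pass
--
-- def find_blocks2(arr):
--     blocks = []
--     N = len(arr)
--     debug("total arr:", arr)
--     last_ind = 0
--     last_val = arr[0]
--     for ii in range(1, N):
--         if last_val == arr[ii]:
--             pass
--         else:
--             blocks.append((last_ind, ii))
--             last_ind = ii
--             last_val = arr[ii]
--     blocks.append((last_ind, N))
--     return blocks
-- ===== SOURCE B (Python) =====
-- def find_blocks2(arr):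
--     # Boundary-based: collect transition indices once, then pair consecutive edges.
--     if not arr:
--         return []
--     N = len(arr)
--     edges = [0] + [i for i in range(1, N) if arr[i] != arr[i - 1]] + [N]
--     return list(zip(edges, edges[1:]))
-- ===== Notes on version B (the rewrite author's own statement) =====
-- stated objective: alternative
-- what changed: Replaces A's incremental last_val/last_ind state machine with a boundary-list decomposition: one comprehension collects the transition indices, and zipping consecutive edges yields the blocks.
import Mathlib
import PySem

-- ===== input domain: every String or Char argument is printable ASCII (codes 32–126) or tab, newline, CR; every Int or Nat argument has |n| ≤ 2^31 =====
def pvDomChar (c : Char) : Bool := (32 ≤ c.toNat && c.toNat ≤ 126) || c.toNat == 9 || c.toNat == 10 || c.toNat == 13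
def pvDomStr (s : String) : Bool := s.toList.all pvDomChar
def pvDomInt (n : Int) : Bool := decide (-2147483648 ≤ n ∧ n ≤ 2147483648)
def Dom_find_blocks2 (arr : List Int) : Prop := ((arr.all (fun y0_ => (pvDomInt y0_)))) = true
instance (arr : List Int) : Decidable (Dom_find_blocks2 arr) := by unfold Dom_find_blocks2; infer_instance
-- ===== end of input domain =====

-- B replaces A's incremental last_val/last_ind loop by a boundary-list decomposition
-- (collect transition indices, zip consecutive edges); same cost, different structure.


-- ===== PORT A =====
-- arr[0] raises IndexError on the empty list: excluded by Pre_; inside Pre_ every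
-- pyGetD index is in range, so its default is never read and pyGetD is exact.
def find_blocks2 (arr : List Int) : List (Int × Int) :=
  let N : Int := arr.length
  let s := (PySem.List.pyRange 1 N 1).foldl
    (fun (st : List (Int × Int) × Int × Int) ii =>
      if st.2.2 == PySem.List.pyGetD arr ii 0 then st
      else (st.1 ++ [(st.2.1, ii)], ii, PySem.List.pyGetD arr ii 0))
    ([], 0, PySem.List.pyGetD arr 0 0)
  s.1 ++ [(s.2.1, N)]

-- ===== PORT B =====
-- edges[1:] on a list is exactly List.tail (= drop 1).
def find_blocks2_alt (arr : List Int) : List (Int × Int) :=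
  if arr = [] then []
  else
    let N : Int := arr.length
    let edges : List Int :=
      0 :: (PySem.List.pyRange 1 N 1).filter
        (fun i => PySem.List.pyGetD arr i 0 != PySem.List.pyGetD arr (i - 1) 0) ++ [N]
    edges.zip edges.tail

-- ===== PRECONDITION & SPEC =====
-- A raises IndexError (arr[0]) on the empty list; Pre_ excludes exactly that input.
def Pre_find_blocks2 (arr : List Int) : Prop := arr ≠ []
instance (arr : List Int) : Decidable (Pre_find_blocks2 arr) := by unfold Pre_find_blocks2; infer_instance
def pvWitness_find_blocks2 : List Int := ([1, 1, 2])

def Spec_find_blocks2 (arr : List Int) (out : List (Int × Int)) : Prop := out = find_blocks2_alt arr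
instance (arr : List Int) (out : List (Int × Int)) : Decidable (Spec_find_blocks2 arr out) := by unfold Spec_find_blocks2; infer_instance

-- ===== CLAIM (what is proved, stated in full; the proofs are below) =====
def Claim_equal_find_blocks2 : Prop := ∀ (arr : List Int), Dom_find_blocks2 arr → Pre_find_blocks2 arr → Spec_find_blocks2 arr (find_blocks2 arr)

-- ===== LEMMAS AND PROOFS =====

-- the transition-index list shared by both proofs
def pvE (arr : List Int) : List Int :=
  (PySem.List.pyRange 1 (arr.length : Int) 1).filter
    (fun i => PySem.List.pyGetD arr i 0 != PySem.List.pyGetD arr (i - 1) 0)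

-- A's loop body
def pvBody (arr : List Int) (st : List (Int × Int) × Int × Int) (ii : Int) :
    List (Int × Int) × Int × Int :=
  if st.2.2 == PySem.List.pyGetD arr ii 0 then st
  else (st.1 ++ [(st.2.1, ii)], ii, PySem.List.pyGetD arr ii 0)

lemma pvGetD_append_lt (l : List Int) (y i : Int) (h0 : 0 ≤ i) (h : i < (l.length : Int)) :
    PySem.List.pyGetD (l ++ [y]) i 0 = PySem.List.pyGetD l i 0 := by
  rw [PySem.List.pyGetD_eq_getElem _ 0 h0 (by simp; omega),
      PySem.List.pyGetD_eq_getElem _ 0 h0 (by exact_mod_cast h)]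
  exact List.getElem_append_left (by omega)

lemma pvGetD_append_len (l : List Int) (y : Int) :
    PySem.List.pyGetD (l ++ [y]) (l.length : Int) 0 = y := by
  rw [PySem.List.pyGetD_natCast]
  simp [List.getD]

lemma pvGetD_last (l : List Int) (h : l ≠ []) :
    PySem.List.pyGetD l ((l.length : Int) - 1) 0 = l.getLast?.getD 0 := by
  have hl : 0 < l.length := List.length_pos_iff.mpr h
  rw [PySem.List.pyGetD_eq_getElem _ 0 (by omega) (by omega)]
  have ht : (((l.length : Int) - 1)).toNat = l.length - 1 := by omega
  rw [List.getLast?_eq_getElem?]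
  simp [ht, List.getElem?_eq_getElem (by omega : l.length - 1 < l.length)]

lemma pv_zip_snoc (l m : List Int) (w z : Int) (h : l.length = m.length + 1) :
    (l ++ [w]).zip (m ++ [z]) = l.zip m ++ [(l.getLast?.getD 0, z)] := by
  induction m generalizing l with
  | nil =>
    match l, h with
    | [a], _ => simp
  | cons b m' ih =>
    match l, h with
    | a :: l', h =>
      have h' : l'.length = m'.length + 1 := by simpa using h
      have hne : l' ≠ [] := by intro hz; simp [hz] at h'
      simp only [List.cons_append, List.zip_cons_cons, ih l' h']
      cases hg : l'.getLast? with
      | none => exact absurd (List.getLast?_eq_none_iff.mp hg) hne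
      | some v => simp [List.getLast?_cons, hg]

-- the transition list of arr ++ [y]
lemma pvE_snoc (l : List Int) (y : Int) (h : l ≠ []) :
    pvE (l ++ [y]) =
      if l.getLast?.getD 0 = y then pvE l else pvE l ++ [(l.length : Int)] := by
  have hl : 0 < l.length := List.length_pos_iff.mpr h
  have hlen : ((l ++ [y]).length : Int) = (l.length : Int) + 1 := by simp
  unfold pvE
  rw [hlen, PySem.List.pyRange_one_succ_right (by exact_mod_cast hl),
      List.filter_append]
  have hcong : ∀ i ∈ PySem.List.pyRange 1 (l.length : Int) 1,
      (PySem.List.pyGetD (l ++ [y]) i 0 != PySem.List.pyGetD (l ++ [y]) (i - 1) 0)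
        = (PySem.List.pyGetD l i 0 != PySem.List.pyGetD l (i - 1) 0) := by
    intro i hi
    rw [PySem.List.mem_pyRange_one] at hi
    rw [pvGetD_append_lt l y i (by omega) hi.2,
        pvGetD_append_lt l y (i - 1) (by omega) (by omega)]
  rw [List.filter_congr hcong]
  have h1 : PySem.List.pyGetD (l ++ [y]) (l.length : Int) 0 = y := pvGetD_append_len l y
  have h2 : PySem.List.pyGetD (l ++ [y]) ((l.length : Int) - 1) 0 = l.getLast?.getD 0 := by
    rw [pvGetD_append_lt l y _ (by omega) (by omega), pvGetD_last l h]
  simp only [List.filter_cons, List.filter_nil, h1, h2]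
  by_cases hc : l.getLast?.getD 0 = y
  · simp [hc]
  · simp [hc, Ne.symm hc]

-- invariant of A's loop: state = (blocks built so far = zip of the inner edges,
-- last_ind = last edge, last_val = last element)
lemma pv_loop_inv (x : Int) (t : List Int) :
    (PySem.List.pyRange 1 (((x :: t).length : Int)) 1).foldl (pvBody (x :: t)) ([], 0, x)
      = ((0 :: pvE (x :: t)).zip (pvE (x :: t)),
         (0 :: pvE (x :: t)).getLast?.getD 0, (x :: t).getLast?.getD 0) := by
  induction t using List.reverseRecOn with
  | nil =>
    have : pvE [x] = [] := by unfold pvE; simp [PySem.List.pyRange_one_eq_nil]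
    simp [this, PySem.List.pyRange_one_eq_nil]
  | append_singleton t y ih =>
    have harr : x :: (t ++ [y]) = (x :: t) ++ [y] := by simp
    have hne : (x :: t) ≠ [] := by simp
    set l := x :: t with hl
    have hN : ((l ++ [y]).length : Int) = (l.length : Int) + 1 := by simp
    rw [harr, hN, PySem.List.pyRange_one_succ_right (by simp [hl]),
        List.foldl_append]
    have hcong : (PySem.List.pyRange 1 (l.length : Int) 1).foldl (pvBody (l ++ [y])) ([], 0, x)
        = (PySem.List.pyRange 1 (l.length : Int) 1).foldl (pvBody l) ([], 0, x) := by
      apply PySem.List.foldl_congr_mem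
      intro acc i hi
      rw [PySem.List.mem_pyRange_one] at hi
      unfold pvBody
      rw [pvGetD_append_lt l y i (by omega) hi.2]
    rw [hcong, ih, pvE_snoc l y hne]
    unfold pvBody
    simp only [List.foldl_cons, List.foldl_nil]
    rw [pvGetD_append_len l y]
    by_cases hc : l.getLast?.getD 0 = y
    · simp [hc]
    · have hbne : (l.getLast?.getD 0 == y) = false := by simp [hc]
      simp only [hbne, Bool.false_eq_true, if_false, if_neg hc]
      have hz : ((0 :: pvE l) ++ [(l.length : Int)]).zip (pvE l ++ [(l.length : Int)])
          = (0 :: pvE l).zip (pvE l) ++ [((0 :: pvE l).getLast?.getD 0, (l.length : Int))] :=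
        pv_zip_snoc (0 :: pvE l) (pvE l) _ _ (by simp)
      simp only [List.cons_append] at hz
      simp [hz, List.getLast?_cons]

-- ===== VERDICT (by name: the statement is the Claim_ definition above) =====
theorem find_blocks2_spec : Claim_equal_find_blocks2 := by
  intro arr _ hpre
  unfold Spec_find_blocks2
  match arr, hpre with
  | x :: t, _ =>
    show find_blocks2 (x :: t) = find_blocks2_alt (x :: t)
    unfold find_blocks2 find_blocks2_alt
    simp only [if_neg (List.cons_ne_nil x t)]
    have hinit : PySem.List.pyGetD (x :: t) 0 0 = x := by
      simp [PySem.List.pyGetD_zero_cons]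
    have hfold := pv_loop_inv x t
    unfold pvBody at hfold
    rw [hinit, hfold]
    have hz : ((0 :: pvE (x :: t)) ++ [(((x :: t).length : Int))]).zip (pvE (x :: t) ++ [(((x :: t).length : Int))])
        = (0 :: pvE (x :: t)).zip (pvE (x :: t)) ++ [((0 :: pvE (x :: t)).getLast?.getD 0, (((x :: t).length : Int)))] :=
      pv_zip_snoc (0 :: pvE (x :: t)) (pvE (x :: t)) _ _ (by simp)
    show (0 :: pvE (x :: t)).zip (pvE (x :: t)) ++ [((0 :: pvE (x :: t)).getLast?.getD 0, ((x :: t).length : Int))]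
      = ((0 :: pvE (x :: t)) ++ [((x :: t).length : Int)]).zip (((0 :: pvE (x :: t)) ++ [((x :: t).length : Int)]).tail)
    simp only [List.cons_append, List.tail_cons]
    simp only [List.cons_append] at hz
    exact hz.symm
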